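-- pv_equiv track=rewrite | github.com/lkebnl/BNL_CE_Checkout | CTS_FEMB_QC_top.py | parse_assembly_data_from_comment
-- ===== SOURCE A (Python) =====
-- def parse_assembly_data_from_comment(comment_str):
--     """
--     Parse assembly data from csv_data['comment'] string.
--
--     Format: "Bottom_HWDB=A123,Bottom_CE=ZZZ1234,Bottom_Cover=1234,Bottom_FEMB=...,Top_HWDB=...,..."
--
--     Args:
--         comment_str: CSV-style comment string from assembly
--
--     Returns:
--         dict: {
--             'bottom': {'hwdb_qr': str, 'ce_box_sn': str, 'cover_last4': str, 'femb_sn': str},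
--             'top': {'hwdb_qr': str, 'ce_box_sn': str, 'cover_last4': str, 'femb_sn': str}
--         }
--     """
--     result = {
--         'bottom': {'hwdb_qr': '', 'ce_box_sn': '', 'cover_last4': '', 'femb_sn': ''},
--         'top': {'hwdb_qr': '', 'ce_box_sn': '', 'cover_last4': '', 'femb_sn': ''}
--     }
--
--     # Parse CSV-style string
--     parts = comment_str.split(',')
--     data_dict = {}
--     for part in parts:
--         if '=' in part:
--             key, value = part.split('=', 1)
--             data_dict[key.strip()] = value.strip()
--
--     # Extract bottom slot data
--     result['bottom']['hwdb_qr'] = data_dict.get('Bottom_HWDB', '')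
--     result['bottom']['ce_box_sn'] = data_dict.get('Bottom_CE', '')
--     result['bottom']['cover_last4'] = data_dict.get('Bottom_Cover', '')
--     result['bottom']['femb_sn'] = data_dict.get('Bottom_FEMB', '')
--
--     # Extract top slot data
--     result['top']['hwdb_qr'] = data_dict.get('Top_HWDB', '')
--     result['top']['ce_box_sn'] = data_dict.get('Top_CE', '')
--     result['top']['cover_last4'] = data_dict.get('Top_Cover', '')
--     result['top']['femb_sn'] = data_dict.get('Top_FEMB', '')
--
--     return result
-- ===== SOURCE B (Python) =====
-- _FIELD_MAP = {
--     'Bottom_HWDB': ('bottom', 'hwdb_qr'),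
--     'Bottom_CE': ('bottom', 'ce_box_sn'),
--     'Bottom_Cover': ('bottom', 'cover_last4'),
--     'Bottom_FEMB': ('bottom', 'femb_sn'),
--     'Top_HWDB': ('top', 'hwdb_qr'),
--     'Top_CE': ('top', 'ce_box_sn'),
--     'Top_Cover': ('top', 'cover_last4'),
--     'Top_FEMB': ('top', 'femb_sn'),
-- }
--
--
-- def parse_assembly_data_from_comment(comment_str):
--     """Single-pass parse: dispatch each 'key=value' part straight into the result."""
--     result = {
--         'bottom': {'hwdb_qr': '', 'ce_box_sn': '', 'cover_last4': '', 'femb_sn': ''},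
--         'top': {'hwdb_qr': '', 'ce_box_sn': '', 'cover_last4': '', 'femb_sn': ''}
--     }
--     for part in comment_str.split(','):
--         if '=' in part:
--             key, value = part.split('=', 1)
--             dest = _FIELD_MAP.get(key.strip())
--             if dest is not None:
--                 result[dest[0]][dest[1]] = value.strip()
--     return result
-- ===== Notes on version B (the rewrite author's own statement) =====
-- stated objective: simpler
-- what changed: B drops A's intermediate data_dict and eight explicit .get lines: a constant dispatch table maps each recognised key to its (slot, field) destination, and one pass over the comma-separated parts assigns each recognised key=value directly into the result.
import Mathlib
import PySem

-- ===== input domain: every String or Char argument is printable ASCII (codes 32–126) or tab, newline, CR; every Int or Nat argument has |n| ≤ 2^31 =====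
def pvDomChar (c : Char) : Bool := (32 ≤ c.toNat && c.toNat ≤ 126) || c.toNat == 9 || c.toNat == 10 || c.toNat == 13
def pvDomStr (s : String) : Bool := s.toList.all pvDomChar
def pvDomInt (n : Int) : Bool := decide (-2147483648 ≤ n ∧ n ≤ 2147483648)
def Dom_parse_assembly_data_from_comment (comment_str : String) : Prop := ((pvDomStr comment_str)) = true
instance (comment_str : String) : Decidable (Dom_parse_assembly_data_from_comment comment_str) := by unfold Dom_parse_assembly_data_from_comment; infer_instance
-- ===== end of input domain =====

-- B replaces A's intermediate data_dict + eight .get lines with a dispatch table and one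
-- direct-assignment pass over the parts; same return value, same O(n) cost (objective: simpler).


-- ===== PORT A =====
-- A: split on ',', build data_dict from the 'key=value' parts (strip both, last wins), then
-- fill the result's eight fields with data_dict.get(<key>, ''); the result literal below is the
-- initialised nested dict after the eight (fully overwriting) assignments.
def parse_assembly_data_from_comment (comment_str : String) : List (String × List (String × String)) :=
  let parts := (PySem.Str.split? comment_str ",").getD []
  let data_dict : PySem.Dict String String := parts.foldl (fun d part =>
      if PySem.Str.isIn "=" part then
        match PySem.Str.splitMax? part "=" 1 with
        | some (key :: value :: _) => d.insert (PySem.Str.strip key) (PySem.Str.strip value)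
        | _ => d
      else d) PySem.Dict.empty
  [("bottom", [("hwdb_qr", data_dict.getD "Bottom_HWDB" ""),
               ("ce_box_sn", data_dict.getD "Bottom_CE" ""),
               ("cover_last4", data_dict.getD "Bottom_Cover" ""),
               ("femb_sn", data_dict.getD "Bottom_FEMB" "")]),
   ("top", [("hwdb_qr", data_dict.getD "Top_HWDB" ""),
            ("ce_box_sn", data_dict.getD "Top_CE" ""),
            ("cover_last4", data_dict.getD "Top_Cover" ""),
            ("femb_sn", data_dict.getD "Top_FEMB" "")])]

-- ===== PORT B =====
def pvFieldMap : PySem.Dict String (String × String) :=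
  PySem.Dict.ofList
    [("Bottom_HWDB", ("bottom", "hwdb_qr")),
     ("Bottom_CE", ("bottom", "ce_box_sn")),
     ("Bottom_Cover", ("bottom", "cover_last4")),
     ("Bottom_FEMB", ("bottom", "femb_sn")),
     ("Top_HWDB", ("top", "hwdb_qr")),
     ("Top_CE", ("top", "ce_box_sn")),
     ("Top_Cover", ("top", "cover_last4")),
     ("Top_FEMB", ("top", "femb_sn"))]

-- B: one pass; each recognised 'key=value' part is assigned straight into the nested result.
def parse_assembly_data_from_comment_alt (comment_str : String) : List (String × List (String × String)) :=
  let init : PySem.Dict String (PySem.Dict String String) :=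
    PySem.Dict.ofList
      [("bottom", PySem.Dict.ofList [("hwdb_qr", ""), ("ce_box_sn", ""), ("cover_last4", ""), ("femb_sn", "")]),
       ("top", PySem.Dict.ofList [("hwdb_qr", ""), ("ce_box_sn", ""), ("cover_last4", ""), ("femb_sn", "")])]
  let r := ((PySem.Str.split? comment_str ",").getD []).foldl (fun r part =>
      if PySem.Str.isIn "=" part then
        match PySem.Str.splitMax? part "=" 1 with
        | some kv =>
          match kv with
          | [] => r
          | [_] => r
          | key :: value :: _ =>
            match pvFieldMap.get? (PySem.Str.strip key) with
            | some dest => r.modify dest.1 PySem.Dict.empty (fun inner => inner.insert dest.2 (PySem.Str.strip value))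
            | none => r
        | none => r
      else r) init
  r.items.map (fun p => (p.1, p.2.items))

-- ===== PRECONDITION & SPEC =====
def Spec_parse_assembly_data_from_comment (comment_str : String) (out : List (String × List (String × String))) : Prop := out = parse_assembly_data_from_comment_alt comment_str
instance (comment_str : String) (out : List (String × List (String × String))) : Decidable (Spec_parse_assembly_data_from_comment comment_str out) := by unfold Spec_parse_assembly_data_from_comment; infer_instance

-- ===== CLAIM (what is proved, stated in full; the proofs are below) =====
def Claim_equal_parse_assembly_data_from_comment : Prop := ∀ (comment_str : String), Dom_parse_assembly_data_from_comment comment_str → Spec_parse_assembly_data_from_comment comment_str (parse_assembly_data_from_comment comment_str)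

-- ===== LEMMAS AND PROOFS =====

-- B's nested state, expressed as a function of A's flat data_dict.
def pvMkD (d : PySem.Dict String String) : PySem.Dict String (PySem.Dict String String) :=
  PySem.Dict.mk
    [("bottom", PySem.Dict.mk
        [("hwdb_qr", d.getD "Bottom_HWDB" ""), ("ce_box_sn", d.getD "Bottom_CE" ""),
         ("cover_last4", d.getD "Bottom_Cover" ""), ("femb_sn", d.getD "Bottom_FEMB" "")]),
     ("top", PySem.Dict.mk
        [("hwdb_qr", d.getD "Top_HWDB" ""), ("ce_box_sn", d.getD "Top_CE" ""),
         ("cover_last4", d.getD "Top_Cover" ""), ("femb_sn", d.getD "Top_FEMB" "")])]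

theorem pv_dispatch (d : PySem.Dict String String) (k v : String) :
    (match pvFieldMap.get? k with
     | some dest => (pvMkD d).modify dest.1 PySem.Dict.empty (fun inner => inner.insert dest.2 v)
     | none => pvMkD d) = pvMkD (d.insert k v) := by
  by_cases h1 : k = "Bottom_HWDB"
  · subst h1
    show (pvMkD d).modify "bottom" PySem.Dict.empty (fun inner => inner.insert "hwdb_qr" v) = _
    simp only [pvMkD, PySem.Dict.getD_insert]
    simp [pvMkD, PySem.Dict.modify, PySem.Dict.insert, PySem.Dict.contains, PySem.Dict.getD,
      PySem.Dict.get?, PySem.Dict.items]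
  by_cases h2 : k = "Bottom_CE"
  · subst h2
    show (pvMkD d).modify "bottom" PySem.Dict.empty (fun inner => inner.insert "ce_box_sn" v) = _
    simp only [pvMkD, PySem.Dict.getD_insert]
    simp [pvMkD, PySem.Dict.modify, PySem.Dict.insert, PySem.Dict.contains, PySem.Dict.getD,
      PySem.Dict.get?, PySem.Dict.items]
  by_cases h3 : k = "Bottom_Cover"
  · subst h3
    show (pvMkD d).modify "bottom" PySem.Dict.empty (fun inner => inner.insert "cover_last4" v) = _
    simp only [pvMkD, PySem.Dict.getD_insert]
    simp [pvMkD, PySem.Dict.modify, PySem.Dict.insert, PySem.Dict.contains, PySem.Dict.getD,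
      PySem.Dict.get?, PySem.Dict.items]
  by_cases h4 : k = "Bottom_FEMB"
  · subst h4
    show (pvMkD d).modify "bottom" PySem.Dict.empty (fun inner => inner.insert "femb_sn" v) = _
    simp only [pvMkD, PySem.Dict.getD_insert]
    simp [pvMkD, PySem.Dict.modify, PySem.Dict.insert, PySem.Dict.contains, PySem.Dict.getD,
      PySem.Dict.get?, PySem.Dict.items]
  by_cases h5 : k = "Top_HWDB"
  · subst h5
    show (pvMkD d).modify "top" PySem.Dict.empty (fun inner => inner.insert "hwdb_qr" v) = _
    simp only [pvMkD, PySem.Dict.getD_insert]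
    simp [pvMkD, PySem.Dict.modify, PySem.Dict.insert, PySem.Dict.contains, PySem.Dict.getD,
      PySem.Dict.get?, PySem.Dict.items]
  by_cases h6 : k = "Top_CE"
  · subst h6
    show (pvMkD d).modify "top" PySem.Dict.empty (fun inner => inner.insert "ce_box_sn" v) = _
    simp only [pvMkD, PySem.Dict.getD_insert]
    simp [pvMkD, PySem.Dict.modify, PySem.Dict.insert, PySem.Dict.contains, PySem.Dict.getD,
      PySem.Dict.get?, PySem.Dict.items]
  by_cases h7 : k = "Top_Cover"
  · subst h7
    show (pvMkD d).modify "top" PySem.Dict.empty (fun inner => inner.insert "cover_last4" v) = _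
    simp only [pvMkD, PySem.Dict.getD_insert]
    simp [pvMkD, PySem.Dict.modify, PySem.Dict.insert, PySem.Dict.contains, PySem.Dict.getD,
      PySem.Dict.get?, PySem.Dict.items]
  by_cases h8 : k = "Top_FEMB"
  · subst h8
    show (pvMkD d).modify "top" PySem.Dict.empty (fun inner => inner.insert "femb_sn" v) = _
    simp only [pvMkD, PySem.Dict.getD_insert]
    simp [pvMkD, PySem.Dict.modify, PySem.Dict.insert, PySem.Dict.contains, PySem.Dict.getD,
      PySem.Dict.get?, PySem.Dict.items]
  have hg : pvFieldMap.get? k = none := by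
    rw [show pvFieldMap = PySem.Dict.mk
      [("Bottom_HWDB", ("bottom", "hwdb_qr")), ("Bottom_CE", ("bottom", "ce_box_sn")),
       ("Bottom_Cover", ("bottom", "cover_last4")), ("Bottom_FEMB", ("bottom", "femb_sn")),
       ("Top_HWDB", ("top", "hwdb_qr")), ("Top_CE", ("top", "ce_box_sn")),
       ("Top_Cover", ("top", "cover_last4")), ("Top_FEMB", ("top", "femb_sn"))] from rfl]
    simp [PySem.Dict.get?_mk_cons, PySem.Dict.get?,
      beq_eq_false_iff_ne.mpr (Ne.symm h1), beq_eq_false_iff_ne.mpr (Ne.symm h2),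
      beq_eq_false_iff_ne.mpr (Ne.symm h3), beq_eq_false_iff_ne.mpr (Ne.symm h4),
      beq_eq_false_iff_ne.mpr (Ne.symm h5), beq_eq_false_iff_ne.mpr (Ne.symm h6),
      beq_eq_false_iff_ne.mpr (Ne.symm h7), beq_eq_false_iff_ne.mpr (Ne.symm h8)]
  simp only [hg]
  simp [pvMkD, PySem.Dict.getD_insert, Ne.symm h1, Ne.symm h2, Ne.symm h3, Ne.symm h4,
    Ne.symm h5, Ne.symm h6, Ne.symm h7, Ne.symm h8]

theorem pv_step (d : PySem.Dict String String) (part : String) :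
    (if PySem.Str.isIn "=" part then
        match PySem.Str.splitMax? part "=" 1 with
        | some kv =>
          match kv with
          | [] => pvMkD d
          | [_] => pvMkD d
          | key :: value :: _ =>
            match pvFieldMap.get? (PySem.Str.strip key) with
            | some dest => (pvMkD d).modify dest.1 PySem.Dict.empty (fun inner => inner.insert dest.2 (PySem.Str.strip value))
            | none => pvMkD d
        | none => pvMkD d
      else pvMkD d)
    = pvMkD (if PySem.Str.isIn "=" part then
        match PySem.Str.splitMax? part "=" 1 with
        | some (key :: value :: _) => d.insert (PySem.Str.strip key) (PySem.Str.strip value)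
        | _ => d
      else d) := by
  cases hI : PySem.Str.isIn "=" part with
  | false => simp [hI]
  | true =>
    simp only [hI, if_true]
    cases hS : PySem.Str.splitMax? part "=" 1 with
    | none => rfl
    | some l =>
      match l with
      | [] => rfl
      | [_] => rfl
      | key :: value :: rest => exact pv_dispatch d (PySem.Str.strip key) (PySem.Str.strip value)

theorem pv_fold (parts : List String) (d : PySem.Dict String String) :
    parts.foldl (fun r part =>
      if PySem.Str.isIn "=" part then
        match PySem.Str.splitMax? part "=" 1 with
        | some kv =>
          match kv with
          | [] => r
          | [_] => r
          | key :: value :: _ =>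
            match pvFieldMap.get? (PySem.Str.strip key) with
            | some dest => r.modify dest.1 PySem.Dict.empty (fun inner => inner.insert dest.2 (PySem.Str.strip value))
            | none => r
        | none => r
      else r) (pvMkD d)
    = pvMkD (parts.foldl (fun d part =>
      if PySem.Str.isIn "=" part then
        match PySem.Str.splitMax? part "=" 1 with
        | some (key :: value :: _) => d.insert (PySem.Str.strip key) (PySem.Str.strip value)
        | _ => d
      else d) d) := by
  induction parts generalizing d with
  | nil => rfl
  | cons p ps ih => simp only [List.foldl_cons, pv_step, ih]

-- ===== VERDICT (by name: the statement is the Claim_ definition above) =====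
theorem parse_assembly_data_from_comment_spec : Claim_equal_parse_assembly_data_from_comment := by
  intro s _
  unfold Spec_parse_assembly_data_from_comment
  simp only [parse_assembly_data_from_comment, parse_assembly_data_from_comment_alt]
  rw [show (PySem.Dict.ofList
      [("bottom", PySem.Dict.ofList [("hwdb_qr", ""), ("ce_box_sn", ""), ("cover_last4", ""), ("femb_sn", "")]),
       ("top", PySem.Dict.ofList [("hwdb_qr", ""), ("ce_box_sn", ""), ("cover_last4", ""), ("femb_sn", "")])]
      : PySem.Dict String (PySem.Dict String String)) = pvMkD PySem.Dict.empty from rfl, pv_fold]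
  rfl
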